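-- pv_equiv track=rewrite | github.com/pypi-data/pypi-mirror-341 | packages/maddy-hack/maddy_hack-0.1.0.tar.gz/maddy_hack-0.1.0/tests/test_custom_model.py | largest_sum_cycle
-- ===== SOURCE A (Python) =====
-- from collections import deque
--
-- def largest_sum_cycle(edge):
--     """Compute the largest sum of node values in a cycle if present."""
--     n = len(edge)
--     indegree = [0] * n
--     for i in range(n):
--         if edge[i] != -1:
--             indegree[edge[i]] += 1
--
--     visited = [False] * n
--     q = deque()
--     for i in range(n):
--         if indegree[i] == 0:
--             visited[i] = True
--             q.append(i)
--     while q: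
--         node = q.popleft()
--         if edge[node] == -1:
--             continue
--         next_node = edge[node]
--         indegree[next_node] -= 1
--         if indegree[next_node] == 0 and not visited[next_node]:
--             visited[next_node] = True
--             q.append(next_node)
--
--     ans = -1
--     for i in range(n):
--         if visited[i]:
--             continue
--         sum_cycle = 0
--         cur = i
--         while not visited[cur]:
--             visited[cur] = True
--             sum_cycle += cur
--             cur = edge[cur]
--         ans = max(ans, sum_cycle)
--     return ans
-- ===== SOURCE B (Python) =====
-- def largest_sum_cycle(edge):
--     """Compute the largest sum of node values in a cycle if present."""
--     n = len(edge)
--     best = -1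
--     for i in range(n):
--         total = i
--         cur = edge[i]
--         steps = 1
--         while steps <= n and cur != -1 and cur != i:
--             total += cur
--             cur = edge[cur]
--             steps += 1
--         if cur == i:
--             best = max(best, total)
--     return best
-- ===== Notes on version B (the rewrite author's own statement) =====
-- stated objective: simpler
-- what changed: Replaces the three-pass Kahn indegree-peeling (indegree count, BFS queue peel, then cycle-walk pass) by one direct pass: from every node walk the functional edge at most n steps; iff the walk returns to its start node, the walked nodes are exactly that node's cycle and their sum is a candidate for the maximum.
-- outside the precondition, e.g. on largest_sum_cycle([1, -2, -1]): A returns 1, B returns -1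
import Mathlib
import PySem

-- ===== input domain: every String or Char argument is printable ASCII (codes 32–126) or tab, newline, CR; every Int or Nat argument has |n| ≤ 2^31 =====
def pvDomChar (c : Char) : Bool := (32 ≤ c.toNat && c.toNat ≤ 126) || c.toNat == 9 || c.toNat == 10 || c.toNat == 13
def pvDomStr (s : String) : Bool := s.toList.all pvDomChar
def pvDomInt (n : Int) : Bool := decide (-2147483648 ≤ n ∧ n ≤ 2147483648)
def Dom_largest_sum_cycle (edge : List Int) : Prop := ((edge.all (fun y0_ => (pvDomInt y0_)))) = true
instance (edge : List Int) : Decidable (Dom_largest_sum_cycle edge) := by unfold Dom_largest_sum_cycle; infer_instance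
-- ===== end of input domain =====

-- B replaces A's three-pass Kahn indegree-peeling by a single direct orbit walk from each node
-- (simpler, not faster). Equivalence is proved on Pre_ (entries -1 or in [0,n)); indexing is
-- exact there, so plain list lookups are used instead of Python's negative-index wraparound.

-- ===== PORT A =====
-- list-lookup helpers (exact on Pre_ inputs, where every index used is in range)
def lscGetI (xs : List Int) (i : Nat) : Int := xs.getD i (-1)
def lscGetN (xs : List Int) (i : Nat) : Int := xs.getD i 0
def lscGetB (xs : List Bool) (i : Nat) : Bool := xs.getD i false

-- termination helper for the two marking loops of A (cited by decreasing_by)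
theorem lscCount_set_lt (vis : List Bool) (i : Nat) (h1 : i < vis.length)
    (h2 : lscGetB vis i = false) : (vis.set i true).count false < vis.count false := by
  induction vis generalizing i with
  | nil => simp at h1
  | cons a l ih =>
    cases i with
    | zero =>
      simp only [lscGetB, List.getD] at h2
      simp_all
    | succ m =>
      have h1' : m < l.length := by simpa using h1
      have h2' : lscGetB l m = false := by simpa [lscGetB, List.getD] using h2
      have := ih m h1' h2'
      simp only [List.set, List.count_cons]
      omega

-- phase 1: indegree count (for i in range(n): if edge[i] != -1: indegree[edge[i]] += 1)
def lscIndeg (edge : List Int) : List Int :=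
  (List.range edge.length).foldl
    (fun ind i =>
      if lscGetI edge i ≠ -1 then
        ind.set (lscGetI edge i).toNat (lscGetN ind (lscGetI edge i).toNat + 1)
      else ind)
    (List.replicate edge.length 0)

-- phase 2 init: queue and visited for indegree-0 nodes
def lscInit (ind : List Int) : List Bool × List Nat :=
  (List.range ind.length).foldl
    (fun s i => if lscGetN ind i = 0 then (s.1.set i true, s.2 ++ [i]) else s)
    (List.replicate ind.length false, [])

-- phase 2: BFS peel (while q: …); the `nx < vis.length` conjunct is a pure totality guard,
-- always true on Pre_ inputs (where Python would otherwise raise IndexError)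
def lscBFS (edge : List Int) (ind : List Int) (vis : List Bool) (q : List Nat) : List Bool :=
  match q with
  | [] => vis
  | node :: q' =>
    if lscGetI edge node = -1 then lscBFS edge ind vis q'
    else
      let nx := (lscGetI edge node).toNat
      let ind' := ind.set nx (lscGetN ind nx - 1)
      if h : lscGetN ind' nx = 0 ∧ lscGetB vis nx = false ∧ nx < vis.length then
        lscBFS edge ind' (vis.set nx true) (q' ++ [nx])
      else lscBFS edge ind' vis q'
termination_by 2 * vis.count false + q.length
decreasing_by
  all_goals first
  | (have := lscCount_set_lt vis ((lscGetI edge node).toNat) h.2.2 h.2.1; simp; try omega)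
  | (simp; try omega)

-- phase 3 inner while: walk marking and summing until a visited node; the range conjunct is a
-- totality guard, always true in the states reached on Pre_ inputs
def lscWalk (edge : List Int) (vis : List Bool) (cur : Int) (s : Int) : List Bool × Int :=
  if h : lscGetB vis cur.toNat = false ∧ cur.toNat < vis.length then
    lscWalk edge (vis.set cur.toNat true) (lscGetI edge cur.toNat) (s + cur)
  else (vis, s)
termination_by vis.count false
decreasing_by exact lscCount_set_lt vis cur.toNat h.2 h.1

def largest_sum_cycle (edge : List Int) : Int :=
  let ind := lscIndeg edge
  let iv := lscInit ind
  let vis := lscBFS edge ind iv.1 iv.2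
  ((List.range edge.length).foldl
    (fun st i =>
      if lscGetB st.1 i then st
      else
        let w := lscWalk edge st.1 (Int.ofNat i) 0
        (w.1, max st.2 w.2))
    (vis, (-1 : Int))).2

-- ===== PORT B =====
-- inner while of Source B: walk at most n steps from i, summing, until -1 or back at i
def lscGo (edge : List Int) (n : Nat) (i : Int) (total : Int) (cur : Int) (steps : Nat) :
    Int × Int :=
  if steps ≤ n ∧ cur ≠ -1 ∧ cur ≠ i then
    lscGo edge n i (total + cur) (lscGetI edge cur.toNat) (steps + 1)
  else (total, cur)
termination_by n + 1 - steps
decreasing_by omega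

def largest_sum_cycle_alt (edge : List Int) : Int :=
  (List.range edge.length).foldl
    (fun best i =>
      let r := lscGo edge edge.length (Int.ofNat i) (Int.ofNat i) (lscGetI edge i) 1
      if r.2 = Int.ofNat i then max best r.1 else best)
    (-1)

-- ===== PRECONDITION & SPEC =====
-- Pre_ excludes entries ≥ n or < -n (Python A raises IndexError) and entries in [-n,-2]
-- (A then returns a value produced by Python's negative-index wraparound, a corner no one
-- would specify; B reads such entries as plain non-matching values and may return differently).
def Pre_largest_sum_cycle (edge : List Int) : Prop :=
  ∀ x ∈ edge, x = -1 ∨ (0 ≤ x ∧ x < (edge.length : Int))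
instance (edge : List Int) : Decidable (Pre_largest_sum_cycle edge) := by
  unfold Pre_largest_sum_cycle; infer_instance

def pvWitness_largest_sum_cycle : List Int := [1, 2, 0]

def Spec_largest_sum_cycle (edge : List Int) (out : Int) : Prop := out = largest_sum_cycle_alt edge
instance (edge : List Int) (out : Int) : Decidable (Spec_largest_sum_cycle edge out) := by
  unfold Spec_largest_sum_cycle; infer_instance

-- ===== CLAIM (what is proved, stated in full; the proofs are below) =====
def Claim_equal_largest_sum_cycle : Prop := ∀ (edge : List Int), Dom_largest_sum_cycle edge → Pre_largest_sum_cycle edge → Spec_largest_sum_cycle edge (largest_sum_cycle edge)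

-- ===== LEMMAS AND PROOFS =====

-- ---------- generic list helpers ----------
theorem lscGetD_set {α : Type} (xs : List α) (i j : Nat) (v d : α) :
    (xs.set i v).getD j d = if i = j ∧ j < xs.length then v else xs.getD j d := by
  induction xs generalizing i j with
  | nil => simp [List.getD]
  | cons a l ih =>
    cases i with
    | zero => cases j <;> simp [List.getD]
    | succ m =>
      cases j with
      | zero => simp [List.getD]
      | succ k =>
        have := ih m k
        simp only [List.set, List.getD_cons_succ, List.length_cons, this]
        by_cases h : m = k <;> simp [h, Nat.succ_lt_succ_iff]

theorem lscGetB_set (xs : List Bool) (a j : Nat) (v : Bool) :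
    lscGetB (xs.set a v) j = if a = j ∧ j < xs.length then v else lscGetB xs j :=
  lscGetD_set xs a j v false

theorem lscGetN_set (xs : List Int) (a j : Nat) (v : Int) :
    lscGetN (xs.set a v) j = if a = j ∧ j < xs.length then v else lscGetN xs j :=
  lscGetD_set xs a j v 0

theorem lscGetD_replicate {α : Type} (n j : Nat) (d : α) :
    (List.replicate n d).getD j d = d := by
  induction n generalizing j with
  | zero => simp [List.getD]
  | succ m ih =>
    cases j with
    | zero => simp [List.replicate, List.getD]
    | succ k => simpa [List.replicate, List.getD] using ih k

-- ---------- model layer: iteration, reachability, cycles ----------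
def lscStep (edge : List Int) (j : Nat) : Option Nat :=
  if lscGetI edge j = -1 then none else some (lscGetI edge j).toNat

def lscIter (edge : List Int) : Nat → Nat → Option Nat
  | 0, j => some j
  | k+1, j => (lscStep edge j).bind (lscIter edge k)

abbrev lscReach (edge : List Int) (i j : Nat) : Prop :=
  ∃ s, s < edge.length ∧ lscIter edge s i = some j

abbrev lscCyc (edge : List Int) (i : Nat) : Prop :=
  ∃ k, k < edge.length ∧ lscIter edge (k+1) i = some i

def lscCycleSet (edge : List Int) (i : Nat) : Finset Nat :=
  (Finset.range edge.length).filter (fun j => lscReach edge i j ∧ lscReach edge j i)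

def lscCsum (edge : List Int) (i : Nat) : Int :=
  ∑ j ∈ lscCycleSet edge i, (j : Int)

def lscSpecVal (edge : List Int) : Int :=
  Finset.fold max (-1) (lscCsum edge)
    ((Finset.range edge.length).filter (fun j => lscCyc edge j))

-- ---------- basic facts ----------
theorem lsc_step_char (edge : List Int) (hpre : Pre_largest_sum_cycle edge)
    (j : Nat) (hj : j < edge.length) :
    (lscGetI edge j = -1 ∧ lscStep edge j = none) ∨
    (∃ m, m < edge.length ∧ lscGetI edge j = (m : Int) ∧ lscStep edge j = some m) := by
  have hmem : edge[j] ∈ edge := List.getElem_mem hj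
  have hx : lscGetI edge j = edge[j] := by
    simp [lscGetI, List.getD_eq_getElem?_getD, List.getElem?_eq_getElem hj]
  rcases hpre _ hmem with h | ⟨h0, hlt⟩
  · left
    refine ⟨by rw [hx]; exact h, ?_⟩
    simp [lscStep, hx, h]
  · right
    refine ⟨edge[j].toNat, by omega, by rw [hx]; omega, ?_⟩
    have hne : ¬ edge[j] = -1 := by omega
    simp [lscStep, hx, hne]

theorem lsc_iter_add (edge : List Int) (a b j : Nat) :
    lscIter edge (a + b) j = (lscIter edge a j).bind (lscIter edge b) := by
  induction a generalizing j with
  | zero => simp [lscIter]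
  | succ a ih =>
    have : a + 1 + b = (a + b) + 1 := by omega
    rw [this]
    show (lscStep edge j).bind (lscIter edge (a + b)) = _
    cases h : lscStep edge j with
    | none => simp [lscIter, h]
    | some c => simp [lscIter, h, ih]

theorem lsc_iter_lt (edge : List Int) (hpre : Pre_largest_sum_cycle edge)
    (s j m : Nat) (hj : j < edge.length) (h : lscIter edge s j = some m) :
    m < edge.length := by
  induction s generalizing j with
  | zero => simp [lscIter] at h; omega
  | succ s ih =>
    rcases lsc_step_char edge hpre j hj with ⟨_, hs⟩ | ⟨c, hc, _, hs⟩
    · simp [lscIter, hs] at h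
    · simp only [lscIter, hs, Option.bind_some] at h
      exact ih c hc h

theorem lsc_iter_prefix (edge : List Int) (a j m : Nat) (h : lscIter edge a j = some m) :
    ∀ t, t ≤ a → ∃ c, lscIter edge t j = some c := by
  intro t ht
  have : a = t + (a - t) := by omega
  rw [this, lsc_iter_add] at h
  cases hc : lscIter edge t j with
  | none => rw [hc] at h; simp at h
  | some c => exact ⟨c, rfl⟩

-- two equal defined prefixes let us splice out the middle part of the walk
theorem lsc_splice (edge : List Int) (a t1 t2 j m : Nat) (h12 : t1 < t2) (h2a : t2 ≤ a)
    (heq : lscIter edge t1 j = lscIter edge t2 j) (h : lscIter edge a j = some m) :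
    lscIter edge (t1 + (a - t2)) j = some m := by
  have ha : a = t2 + (a - t2) := by omega
  rw [lsc_iter_add]
  rw [heq]
  rw [ha, lsc_iter_add] at h
  exact h

theorem lsc_pigeon (edge : List Int) (hpre : Pre_largest_sum_cycle edge)
    (a j m : Nat) (hj : j < edge.length) (hna : edge.length ≤ a)
    (h : lscIter edge a j = some m) :
    ∃ t1 t2, t1 < t2 ∧ t2 ≤ edge.length ∧ lscIter edge t1 j = lscIter edge t2 j := by
  have hmt : Set.MapsTo (fun t => (lscIter edge t j).getD 0)
      ↑(Finset.range (edge.length + 1)) ↑(Finset.range edge.length) := by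
    intro t ht
    simp only [Finset.coe_range, Set.mem_Iio] at ht ⊢
    obtain ⟨c, hc⟩ := lsc_iter_prefix edge a j m h t (by omega)
    rw [hc]
    exact lsc_iter_lt edge hpre t j c hj hc
  have hcard : (Finset.range edge.length).card < (Finset.range (edge.length + 1)).card := by
    simp
  obtain ⟨x, hx, y, hy, hxy, hfxy⟩ :=
    Finset.exists_ne_map_eq_of_card_lt_of_maps_to hcard hmt
  simp only [Finset.mem_range] at hx hy
  obtain ⟨cx, hcx⟩ := lsc_iter_prefix edge a j m h x (by omega)
  obtain ⟨cy, hcy⟩ := lsc_iter_prefix edge a j m h y (by omega)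
  have heq : lscIter edge x j = lscIter edge y j := by
    rw [hcx, hcy] at hfxy ⊢
    simp at hfxy
    rw [hfxy]
  rcases Nat.lt_or_ge x y with hlt | hge
  · exact ⟨x, y, hlt, by omega, heq⟩
  · have : y < x := by omega
    exact ⟨y, x, this, by omega, heq.symm⟩

-- any realized iterate can be realized in < n steps (splice out a repeated prefix node)
theorem lsc_compress (edge : List Int) (hpre : Pre_largest_sum_cycle edge)
    (j m : Nat) (hj : j < edge.length) :
    ∀ a, lscIter edge a j = some m → lscReach edge j m := by
  intro a
  induction a using Nat.strong_induction_on with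
  | _ a ih =>
    intro h
    rcases Nat.lt_or_ge a edge.length with hlt | hge
    · exact ⟨a, hlt, h⟩
    · obtain ⟨t1, t2, h12, h2n, heq⟩ := lsc_pigeon edge hpre a j m hj (by omega) h
      have hs := lsc_splice edge a t1 t2 j m h12 (by omega) heq h
      exact ih (t1 + (a - t2)) (by omega) hs

-- a positive-length return to i yields a return of length ≤ n
theorem lsc_period_compress (edge : List Int) (hpre : Pre_largest_sum_cycle edge)
    (i : Nat) (hi : i < edge.length) :
    ∀ s, 1 ≤ s → lscIter edge s i = some i → lscCyc edge i := by
  intro s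
  induction s using Nat.strong_induction_on with
  | _ s ih =>
    intro hs1 h
    rcases Nat.lt_or_ge s (edge.length + 1) with hlt | hge
    · cases s with
      | zero => omega
      | succ t => exact ⟨t, by omega, h⟩
    · obtain ⟨t1, t2, h12, h2n, heq⟩ := lsc_pigeon edge hpre s i i hi (by omega) h
      have hs := lsc_splice edge s t1 t2 i i h12 (by omega) heq h
      exact ih (t1 + (s - t2)) (by omega) (by omega) hs

theorem lsc_min_period (edge : List Int) (i : Nat) (h : lscCyc edge i) :
    ∃ L, 1 ≤ L ∧ L ≤ edge.length ∧ lscIter edge L i = some i ∧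
      ∀ m, 1 ≤ m → m < L → lscIter edge m i ≠ some i := by
  have hex : ∃ k, k < edge.length ∧ lscIter edge (k+1) i = some i := h
  have hex' : ∃ k, lscIter edge (k+1) i = some i := ⟨hex.choose, hex.choose_spec.2⟩
  refine ⟨Nat.find hex' + 1, by omega, ?_, Nat.find_spec hex', ?_⟩
  · have : Nat.find hex' ≤ hex.choose := Nat.find_min' hex' hex.choose_spec.2
    have := hex.choose_spec.1
    omega
  · intro m hm1 hmL hcon
    have : ¬ lscIter edge (m - 1 + 1) i = some i := Nat.find_min hex' (by omega)
    have hm : m - 1 + 1 = m := by omega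
    rw [hm] at this
    exact this hcon

theorem lsc_iter_mod (edge : List Int) (i L : Nat) (hL : 1 ≤ L)
    (h : lscIter edge L i = some i) (a : Nat) :
    lscIter edge a i = lscIter edge (a % L) i := by
  have hmul : ∀ q, lscIter edge (L * q) i = some i := by
    intro q
    induction q with
    | zero => simp [lscIter]
    | succ q ih =>
      have : L * (q + 1) = L * q + L := by ring
      rw [this, lsc_iter_add, ih, Option.bind_some, h]
  calc lscIter edge a i = lscIter edge (L * (a / L) + a % L) i := by
        rw [Nat.div_add_mod a L]
    _ = (lscIter edge (L * (a / L)) i).bind (lscIter edge (a % L)) :=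
        lsc_iter_add edge (L * (a / L)) (a % L) i
    _ = lscIter edge (a % L) i := by rw [hmul, Option.bind_some]

-- the whole orbit chain of a cycle node is defined
theorem lsc_orbit_defined (edge : List Int) (i L : Nat) (hiter : lscIter edge L i = some i)
    (s : Nat) (hs : s ≤ L) : ∃ c, lscIter edge s i = some c := by
  exact lsc_iter_prefix edge L i i hiter s hs

theorem lsc_orbit_inj (edge : List Int) (i L : Nat) (hL1 : 1 ≤ L)
    (hiter : lscIter edge L i = some i)
    (hmin : ∀ m, 1 ≤ m → m < L → lscIter edge m i ≠ some i)
    (a b : Nat) (ha : a < L) (hb : b < L) (hab : lscIter edge a i = lscIter edge b i) :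
    a = b := by
  by_contra hne
  have key : ∀ x y, x < y → y < L → lscIter edge x i = lscIter edge y i → False := by
    intro x y hxy hyL heq
    have hL : lscIter edge L i = some i := hiter
    have hsplit : L = y + (L - y) := by omega
    have : lscIter edge (x + (L - y)) i = some i := by
      rw [lsc_iter_add, heq, ← lsc_iter_add, ← hsplit, hL]
    exact hmin (x + (L - y)) (by omega) (by omega) this
  rcases Nat.lt_or_ge a b with h | h
  · exact key a b h hb hab
  · exact key b a (by omega) ha hab.symm

theorem lsc_reach_trans (edge : List Int) (hpre : Pre_largest_sum_cycle edge)
    (i j m : Nat) (hi : i < edge.length) (h1 : lscReach edge i j) (h2 : lscReach edge j m) :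
    lscReach edge i m := by
  obtain ⟨a, _, ha⟩ := h1
  obtain ⟨b, _, hb⟩ := h2
  have : lscIter edge (a + b) i = some m := by
    rw [lsc_iter_add, ha, Option.bind_some, hb]
  exact lsc_compress edge hpre i m hi (a + b) this

theorem lsc_cycleSet_orbit (edge : List Int) (hpre : Pre_largest_sum_cycle edge)
    (i L : Nat) (hi : i < edge.length) (hL1 : 1 ≤ L) (hLn : L ≤ edge.length)
    (hiter : lscIter edge L i = some i)
    (hmin : ∀ m, 1 ≤ m → m < L → lscIter edge m i ≠ some i) :
    lscCycleSet edge i = (Finset.range L).image (fun s => (lscIter edge s i).getD 0) := by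
  ext j
  simp only [lscCycleSet, Finset.mem_filter, Finset.mem_range, Finset.mem_image]
  constructor
  · rintro ⟨hjn, ⟨a, han, ha⟩, _⟩
    refine ⟨a % L, Nat.mod_lt a (by omega), ?_⟩
    rw [← lsc_iter_mod edge i L hL1 hiter a, ha]
    rfl
  · rintro ⟨s, hsL, hs⟩
    obtain ⟨c, hc⟩ := lsc_iter_prefix edge L i i hiter s (by omega)
    rw [hc] at hs
    simp only [Option.getD_some] at hs
    subst hs
    have hcn : c < edge.length := lsc_iter_lt edge hpre s i c hi hc
    refine ⟨hcn, ⟨s, by omega, hc⟩, ?_⟩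
    rcases Nat.eq_zero_or_pos s with hs0 | hs1
    · subst hs0
      simp only [lscIter] at hc
      cases hc
      exact ⟨0, by omega, rfl⟩
    · refine ⟨L - s, by omega, ?_⟩
      have : lscIter edge (s + (L - s)) i = some i := by
        have : s + (L - s) = L := by omega
        rw [this]; exact hiter
      rw [lsc_iter_add, hc, Option.bind_some] at this
      exact this

theorem lsc_csum_orbit (edge : List Int) (hpre : Pre_largest_sum_cycle edge)
    (i L : Nat) (hi : i < edge.length) (hL1 : 1 ≤ L) (hLn : L ≤ edge.length)
    (hiter : lscIter edge L i = some i)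
    (hmin : ∀ m, 1 ≤ m → m < L → lscIter edge m i ≠ some i) :
    lscCsum edge i = ∑ s ∈ Finset.range L, (((lscIter edge s i).getD 0 : Nat) : Int) := by
  rw [lscCsum, lsc_cycleSet_orbit edge hpre i L hi hL1 hLn hiter hmin]
  rw [Finset.sum_image]
  intro a ha b hb hab
  simp only [Finset.mem_coe, Finset.mem_range] at ha hb
  obtain ⟨ca, hca⟩ := lsc_iter_prefix edge L i i hiter a (by omega)
  obtain ⟨cb, hcb⟩ := lsc_iter_prefix edge L i i hiter b (by omega)
  refine lsc_orbit_inj edge i L hL1 hiter hmin a b ha hb ?_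
  have hab' : ca = cb := by simpa [hca, hcb] using hab
  rw [hca, hcb, hab']

theorem lsc_mem_cycleSet_self (edge : List Int) (i : Nat) (hi : i < edge.length) :
    i ∈ lscCycleSet edge i := by
  simp only [lscCycleSet, Finset.mem_filter, Finset.mem_range]
  exact ⟨hi, ⟨0, by omega, rfl⟩, ⟨0, by omega, rfl⟩⟩

theorem lsc_cycleSet_congr (edge : List Int) (hpre : Pre_largest_sum_cycle edge)
    (i j : Nat) (hi : i < edge.length) (hj : j ∈ lscCycleSet edge i) (hc : lscCyc edge i) :
    lscCyc edge j ∧ lscCycleSet edge j = lscCycleSet edge i := by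
  simp only [lscCycleSet, Finset.mem_filter, Finset.mem_range] at hj
  obtain ⟨hjn, hij, hji⟩ := hj
  constructor
  · obtain ⟨a, _, ha⟩ := hji
    obtain ⟨b, _, hb⟩ := hij
    rcases Nat.eq_zero_or_pos (a + b) with h0 | hpos
    · have ha0 : a = 0 := by omega
      subst ha0
      simp only [lscIter] at ha
      cases ha
      exact hc
    · refine lsc_period_compress edge hpre j hjn (a + b) (by omega) ?_
      rw [lsc_iter_add, ha, Option.bind_some, hb]
  · ext x
    simp only [lscCycleSet, Finset.mem_filter, Finset.mem_range]
    constructor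
    · rintro ⟨hxn, hjx, hxj⟩
      exact ⟨hxn, lsc_reach_trans edge hpre i j x hi hij hjx,
        lsc_reach_trans edge hpre x j i hxn hxj hji⟩
    · rintro ⟨hxn, hix, hxi⟩
      exact ⟨hxn, lsc_reach_trans edge hpre j i x hjn hji hix,
        lsc_reach_trans edge hpre x i j hxn hxi hij⟩

-- ---------- B side ----------
theorem lsc_getI_step (edge : List Int) (hpre : Pre_largest_sum_cycle edge)
    (c m : Nat) (hcn : c < edge.length) (h : lscStep edge c = some m) :
    lscGetI edge c = (m : Int) := by
  rcases lsc_step_char edge hpre c hcn with ⟨_, hs⟩ | ⟨m', _, hgm', hs⟩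
  · rw [hs] at h; cases h
  · rw [hs] at h
    cases h
    exact hgm'

theorem lsc_iter_succ_right (edge : List Int) (t i c m : Nat)
    (h1 : lscIter edge t i = some c) (h2 : lscStep edge c = some m) :
    lscIter edge (t + 1) i = some m := by
  rw [lsc_iter_add, h1, Option.bind_some]
  simp only [lscIter, h2, Option.bind_some]

theorem lsc_goB_cyc (edge : List Int) (hpre : Pre_largest_sum_cycle edge)
    (i : Nat) (hi : i < edge.length) (hc : lscCyc edge i) :
    lscGo edge edge.length (Int.ofNat i) (Int.ofNat i) (lscGetI edge i) 1 =
      (lscCsum edge i, Int.ofNat i) := by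
  obtain ⟨L, hL1, hLn, hiter, hmin⟩ := lsc_min_period edge i hc
  have hIco : ∀ t, t < L → (∑ s ∈ Finset.Ico t L, (((lscIter edge s i).getD 0 : Nat) : Int))
      = ((lscIter edge t i).getD 0 : Nat)
        + ∑ s ∈ Finset.Ico (t+1) L, (((lscIter edge s i).getD 0 : Nat) : Int) := by
    intro t ht
    have h1 : Finset.Ico t L = insert t (Finset.Ico (t+1) L) := by
      ext x; simp only [Finset.mem_Ico, Finset.mem_insert]; omega
    rw [h1, Finset.sum_insert (by simp [Finset.mem_Ico])]
  have aux : ∀ d t c, 1 ≤ t → t ≤ L → L - t = d → lscIter edge t i = some c →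
      ∀ total : Int,
      lscGo edge edge.length ((i : Nat) : Int) total ((c : Nat) : Int) t
        = (total + ∑ s ∈ Finset.Ico t L, (((lscIter edge s i).getD 0 : Nat) : Int),
            ((i : Nat) : Int)) := by
    intro d
    induction d with
    | zero =>
      intro t c ht1 htL hd hct total
      have htL' : t = L := by omega
      subst htL'
      have : c = i := by rw [hiter] at hct; cases hct; rfl
      subst this
      rw [lscGo, if_neg (by simp)]
      simp
    | succ d ih =>
      intro t c ht1 htL hd hct total
      have htL' : t < L := by omega
      have hcn : c < edge.length := lsc_iter_lt edge hpre t i c hi hct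
      have hci : ¬ c = i := by
        intro hcon
        exact hmin t ht1 htL' (by rw [hct, hcon])
      obtain ⟨c2, hc2⟩ := lsc_iter_prefix edge L i i hiter (t+1) (by omega)
      have hs2 : lscStep edge c = some c2 := by
        have h1 := lsc_iter_add edge t 1 i
        rw [hct, Option.bind_some] at h1
        rw [h1] at hc2
        simp only [lscIter] at hc2
        cases hs : lscStep edge c with
        | none => rw [hs] at hc2; cases hc2
        | some m =>
          rw [hs] at hc2
          simp only [Option.bind_some, lscIter] at hc2
          cases hc2
          rfl
      have hstep : lscGetI edge c = (c2 : Int) := lsc_getI_step edge hpre c c2 hcn hs2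
      rw [lscGo, if_pos ⟨by omega, by omega, by exact_mod_cast hci⟩]
      have htn : ((c : Nat) : Int).toNat = c := by omega
      rw [htn, hstep]
      rw [ih (t+1) c2 (by omega) (by omega) (by omega) hc2 (total + (c : Int))]
      rw [hIco t htL', hct]
      simp only [Option.getD_some, Prod.mk.injEq]
      exact ⟨by ring, trivial⟩
  obtain ⟨c1, hc1⟩ := lsc_iter_prefix edge L i i hiter 1 (by omega)
  have hs1 : lscStep edge i = some c1 := by
    simp only [lscIter] at hc1
    cases hs : lscStep edge i with
    | none => rw [hs] at hc1; cases hc1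
    | some m =>
      rw [hs] at hc1
      simp only [Option.bind_some, lscIter] at hc1
      cases hc1
      rfl
  have hE : lscGetI edge i = (c1 : Int) := lsc_getI_step edge hpre i c1 hi hs1
  simp only [Int.ofNat_eq_natCast]
  rw [hE]
  rw [aux (L - 1) 1 c1 (by omega) (by omega) (by omega) hc1 (i : Int)]
  have hsum : lscCsum edge i
      = (i : Int) + ∑ s ∈ Finset.Ico 1 L, (((lscIter edge s i).getD 0 : Nat) : Int) := by
    rw [lsc_csum_orbit edge hpre i L hi hL1 hLn hiter hmin]
    rw [Finset.range_eq_Ico]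
    rcases Nat.eq_or_lt_of_le hL1 with h | h
    · rw [← h]; simp [lscIter]
    · have h1 : Finset.Ico 0 L = insert 0 (Finset.Ico 1 L) := by
        ext x; simp only [Finset.mem_Ico, Finset.mem_insert]; omega
      rw [h1, Finset.sum_insert (by simp [Finset.mem_Ico])]
      simp [lscIter]
  rw [hsum]

theorem lsc_goB_ncyc (edge : List Int) (hpre : Pre_largest_sum_cycle edge)
    (i : Nat) (hi : i < edge.length) (hc : ¬ lscCyc edge i) :
    (lscGo edge edge.length (Int.ofNat i) (Int.ofNat i) (lscGetI edge i) 1).2 ≠ Int.ofNat i := by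
  have aux : ∀ d steps c total, 1 ≤ steps → edge.length + 1 - steps = d → c < edge.length →
      lscIter edge steps i = some c →
      (lscGo edge edge.length ((i : Nat) : Int) total ((c : Nat) : Int) steps).2 = ((i : Nat) : Int) →
      lscCyc edge i := by
    intro d
    induction d with
    | zero =>
      intro steps c total h1 hd hcn hit hres
      rw [lscGo, if_neg (by omega)] at hres
      simp only at hres
      have : c = i := by omega
      subst this
      exact lsc_period_compress edge hpre c hcn steps h1 hit
    | succ d ih =>
      intro steps c total h1 hd hcn hit hres
      rw [lscGo] at hres
      by_cases hcond : (steps ≤ edge.length ∧ ((c : Nat) : Int) ≠ -1 ∧ ((c : Nat) : Int) ≠ ((i : Nat) : Int))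
      · rw [if_pos hcond] at hres
        have htn : ((c : Nat) : Int).toNat = c := by omega
        rw [htn] at hres
        cases hs : lscStep edge c with
        | none =>
          have hgc : lscGetI edge c = -1 := by
            rcases lsc_step_char edge hpre c hcn with ⟨hg, _⟩ | ⟨m, _, _, hsm⟩
            · exact hg
            · rw [hsm] at hs; cases hs
          rw [hgc] at hres
          rw [lscGo, if_neg (by simp)] at hres
          simp only at hres
          omega
        | some m =>
          have hgm : lscGetI edge c = (m : Int) := lsc_getI_step edge hpre c m hcn hs
          have hmn : m < edge.length := by
            rcases lsc_step_char edge hpre c hcn with ⟨_, hsm⟩ | ⟨m', hm', _, hsm⟩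
            · rw [hsm] at hs; cases hs
            · rw [hsm] at hs; cases hs; exact hm'
          rw [hgm] at hres
          exact ih (steps + 1) m (total + (c : Int)) (by omega) (by omega) hmn
            (lsc_iter_succ_right edge steps i c m hit hs) hres
      · rw [if_neg hcond] at hres
        simp only at hres
        have : c = i := by omega
        subst this
        exact lsc_period_compress edge hpre c hcn steps h1 hit
  intro hres
  apply hc
  simp only [Int.ofNat_eq_natCast] at hres
  cases hs : lscStep edge i with
  | none =>
    have hgc : lscGetI edge i = -1 := by
      rcases lsc_step_char edge hpre i hi with ⟨hg, _⟩ | ⟨m, _, _, hsm⟩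
      · exact hg
      · rw [hsm] at hs; cases hs
    rw [hgc] at hres
    rw [lscGo, if_neg (by simp)] at hres
    simp only at hres
    omega
  | some m =>
    have hgm : lscGetI edge i = (m : Int) := lsc_getI_step edge hpre i m hi hs
    have hmn : m < edge.length := by
      rcases lsc_step_char edge hpre i hi with ⟨_, hsm⟩ | ⟨m', hm', _, hsm⟩
      · rw [hsm] at hs; cases hs
      · rw [hsm] at hs; cases hs; exact hm'
    rw [hgm] at hres
    have hit1 : lscIter edge 1 i = some m := by
      simp only [lscIter, hs, Option.bind_some]
    exact aux (edge.length + 1 - 1) 1 m ((i : Nat) : Int) (by omega) rfl hmn hit1 hres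

theorem lsc_foldl_max_filter (m : Nat) (p : Nat → Prop) [DecidablePred p]
    (g : Nat → Int) (c : Int) :
    (List.range m).foldl (fun a i => if p i then max a (g i) else a) c
      = Finset.fold max c g ((Finset.range m).filter p) := by
  induction m with
  | zero => simp
  | succ m ih =>
    rw [List.range_succ, List.foldl_append, ih]
    simp only [List.foldl_cons, List.foldl_nil]
    rw [Finset.range_add_one, Finset.filter_insert]
    by_cases hp : p m
    · rw [if_pos hp, if_pos hp]
      rw [Finset.fold_insert (by simp)]
      exact max_comm _ _
    · rw [if_neg hp, if_neg hp]

theorem lsc_altB_spec (edge : List Int) (hpre : Pre_largest_sum_cycle edge) :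
    largest_sum_cycle_alt edge = lscSpecVal edge := by
  rw [largest_sum_cycle_alt]
  rw [PySem.List.foldl_congr_mem _ _
    (fun a i => if lscCyc edge i then max a (lscCsum edge i) else a) _ ?_]
  · exact lsc_foldl_max_filter edge.length (lscCyc edge) (lscCsum edge) (-1)
  · intro acc x hx
    have hxn : x < edge.length := by simpa using hx
    by_cases hcx : lscCyc edge x
    · rw [lsc_goB_cyc edge hpre x hxn hcx]
      simp [hcx]
    · have := lsc_goB_ncyc edge hpre x hxn hcx
      simp only [if_neg this, if_neg hcx]

-- ---------- A side: phase 1 and 2 ----------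
theorem lsc_foldl_set_len (l : List Nat) (f : List Int → Nat → List Int)
    (hf : ∀ ind x, (f ind x).length = ind.length) (ind : List Int) :
    (l.foldl f ind).length = ind.length := by
  induction l generalizing ind with
  | nil => rfl
  | cons a t ih => rw [List.foldl_cons, ih, hf]

theorem lsc_indeg_len (edge : List Int) : (lscIndeg edge).length = edge.length := by
  rw [lscIndeg, lsc_foldl_set_len]
  · simp
  · intro ind x
    split <;> simp

theorem lsc_indeg_spec (edge : List Int) (hpre : Pre_largest_sum_cycle edge)
    (i : Nat) (hi : i < edge.length) :
    lscGetN (lscIndeg edge) i =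
      (((Finset.range edge.length).filter (fun j => lscGetI edge j = (i : Int))).card : Int) := by
  have key : ∀ m, m ≤ edge.length → ∀ i, i < edge.length →
      lscGetN ((List.range m).foldl
        (fun ind j =>
          if lscGetI edge j ≠ -1 then
            ind.set (lscGetI edge j).toNat (lscGetN ind (lscGetI edge j).toNat + 1)
          else ind)
        (List.replicate edge.length 0)) i =
      (((Finset.range m).filter (fun j => lscGetI edge j = (i : Int))).card : Int) := by
    intro m
    induction m with
    | zero =>
      intro _ i _
      simp [lscGetN, lscGetD_replicate]
    | succ m ih =>
      intro hm i hin
      rw [List.range_succ, List.foldl_append]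
      simp only [List.foldl_cons, List.foldl_nil]
      have hlen : ((List.range m).foldl
          (fun ind j =>
            if lscGetI edge j ≠ -1 then
              ind.set (lscGetI edge j).toNat (lscGetN ind (lscGetI edge j).toNat + 1)
            else ind)
          (List.replicate edge.length 0)).length = edge.length := by
        rw [lsc_foldl_set_len]
        · simp
        · intro ind x
          split <;> simp
      rw [Finset.range_add_one, Finset.filter_insert]
      rcases lsc_step_char edge hpre m (by omega) with ⟨hgm, _⟩ | ⟨e, he, hge, _⟩
      · rw [if_neg (by simp [hgm])]
        have : ¬ lscGetI edge m = (i : Int) := by rw [hgm]; omega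
        rw [if_neg this]
        exact ih (by omega) i hin
      · have hne : lscGetI edge m ≠ -1 := by rw [hge]; omega
        rw [if_pos hne]
        have htn : (lscGetI edge m).toNat = e := by rw [hge]; omega
        rw [htn, lscGetN_set, hlen]
        by_cases hie : e = i
        · subst hie
          rw [if_pos ⟨rfl, hin⟩]
          rw [if_pos (by rw [hge])]
          rw [Finset.card_insert_of_notMem (by simp)]
          rw [ih (by omega) e hin]
          push_cast
          ring
        · rw [if_neg (by tauto)]
          rw [if_neg (by rw [hge]; intro hcon; apply hie; exact_mod_cast hcon)]
          exact ih (by omega) i hin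
  rw [lscIndeg]
  exact key edge.length (le_refl _) i hi

theorem lsc_init_spec (ind : List Int) :
    (lscInit ind).1.length = ind.length ∧
    (∀ i, i < ind.length → lscGetB (lscInit ind).1 i = decide (lscGetN ind i = 0)) ∧
    (lscInit ind).2 = (List.range ind.length).filter (fun i => decide (lscGetN ind i = 0)) := by
  rw [lscInit]
  have key : ∀ m, m ≤ ind.length →
      ((List.range m).foldl
        (fun s i => if lscGetN ind i = 0 then (s.1.set i true, s.2 ++ [i]) else s)
        (List.replicate ind.length false, [])).1.length = ind.length ∧
      (∀ i, i < ind.length →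
        lscGetB ((List.range m).foldl
          (fun s i => if lscGetN ind i = 0 then (s.1.set i true, s.2 ++ [i]) else s)
          (List.replicate ind.length false, [])).1 i
          = decide (i < m ∧ lscGetN ind i = 0)) ∧
      ((List.range m).foldl
        (fun s i => if lscGetN ind i = 0 then (s.1.set i true, s.2 ++ [i]) else s)
        (List.replicate ind.length false, [])).2
        = (List.range m).filter (fun i => decide (lscGetN ind i = 0)) := by
    intro m
    induction m with
    | zero =>
      intro _
      refine ⟨by simp, ?_, by simp⟩
      intro i _
      simp [lscGetB, lscGetD_replicate]
    | succ m ih =>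
      intro hm
      obtain ⟨ih1, ih2, ih3⟩ := ih (by omega)
      rw [List.range_succ, List.foldl_append]
      simp only [List.foldl_cons, List.foldl_nil]
      rw [List.filter_append]
      by_cases h0 : lscGetN ind m = 0
      · rw [if_pos h0]
        refine ⟨by simp [ih1], ?_, ?_⟩
        · intro i hin
          simp only
          rw [lscGetB_set, ih1]
          by_cases him : m = i
          · subst him
            rw [if_pos ⟨rfl, hin⟩]
            simp [h0]
          · rw [if_neg (by tauto)]
            rw [ih2 i hin]
            simp only [decide_eq_decide]
            constructor <;> (rintro ⟨h1, h2⟩; exact ⟨by omega, h2⟩)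
        · simp only [ih3]
          simp [h0]
      · rw [if_neg h0]
        refine ⟨ih1, ?_, ?_⟩
        · intro i hin
          rw [ih2 i hin]
          by_cases him : i = m
          · subst him; simp [h0]
          · simp only [decide_eq_decide]
            constructor <;> (rintro ⟨h1, h2⟩; exact ⟨by omega, h2⟩)
        · simp only [ih3]
          simp [h0]
  obtain ⟨k1, k2, k3⟩ := key ind.length (le_refl _)
  refine ⟨k1, ?_, k3⟩
  intro i hin
  rw [k2 i hin]
  simp only [decide_eq_decide]
  constructor
  · rintro ⟨_, h⟩; exact h
  · intro h; exact ⟨hin, h⟩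

def lscInv (edge : List Int) (ind : List Int) (vis : List Bool) (q : List Nat) : Prop :=
  ind.length = edge.length ∧ vis.length = edge.length ∧
  (∀ x ∈ q, x < edge.length ∧ lscGetB vis x = true) ∧ q.Nodup ∧
  (∀ i, i < edge.length → lscGetN ind i =
    (((Finset.range edge.length).filter
        (fun j => lscGetI edge j = (i : Int) ∧ (lscGetB vis j = false ∨ j ∈ q))).card : Int)) ∧
  (∀ i, i < edge.length → lscGetB vis i = false → lscGetN ind i ≠ 0) ∧
  (∀ S : Finset Nat, (∀ a ∈ S, a < edge.length) →
    (∀ a ∈ S, ∃ b ∈ S, lscGetI edge b = (a : Int)) → ∀ a ∈ S, lscGetB vis a = false)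

def lscEndInv (edge : List Int) (vis : List Bool) : Prop :=
  vis.length = edge.length ∧
  (∀ i, i < edge.length → lscGetB vis i = false →
    ∃ j, j < edge.length ∧ lscGetI edge j = (i : Int) ∧ lscGetB vis j = false) ∧
  (∀ S : Finset Nat, (∀ a ∈ S, a < edge.length) →
    (∀ a ∈ S, ∃ b ∈ S, lscGetI edge b = (a : Int)) → ∀ a ∈ S, lscGetB vis a = false)

theorem lsc_filter_card_congr (n : Nat) (p q : Nat → Prop) [DecidablePred p] [DecidablePred q]
    (h : ∀ j, j < n → (p j ↔ q j)) :
    ((Finset.range n).filter p).card = ((Finset.range n).filter q).card := by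
  congr 1
  apply Finset.filter_congr
  intro j hj
  rw [Finset.mem_range] at hj
  exact (h j hj)

theorem lsc_bfs_inv (edge : List Int) (hpre : Pre_largest_sum_cycle edge)
    (ind : List Int) (vis : List Bool) (q : List Nat) (h : lscInv edge ind vis q) :
    lscEndInv edge (lscBFS edge ind vis q) := by
  revert h
  induction ind, vis, q using lscBFS.induct edge with
  | case1 ind vis =>
    intro h
    obtain ⟨h1, h2, h3, h4, h5, h6, h7⟩ := h
    rw [lscBFS]
    refine ⟨h2, ?_, h7⟩
    intro i hin hvis
    have hne := h6 i hin hvis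
    rw [h5 i hin] at hne
    have hcard : ((Finset.range edge.length).filter
        (fun j => lscGetI edge j = (i : Int) ∧ (lscGetB vis j = false ∨ j ∈ ([] : List Nat)))).card ≠ 0 := by
      intro hc
      rw [hc] at hne
      simp at hne
    obtain ⟨j, hj⟩ := Finset.card_ne_zero.mp hcard
    rw [Finset.mem_filter, Finset.mem_range] at hj
    obtain ⟨hjn, hje, hjv⟩ := hj
    refine ⟨j, hjn, hje, ?_⟩
    rcases hjv with hv | hv
    · exact hv
    · simp at hv
  | case2 ind vis node q' hneg ih =>
    intro h
    obtain ⟨h1, h2, h3, h4, h5, h6, h7⟩ := h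
    rw [lscBFS, if_pos hneg]
    apply ih
    refine ⟨h1, h2, fun x hx => h3 x (List.mem_cons_of_mem _ hx), h4.of_cons, ?_, h6, h7⟩
    intro i hin
    rw [h5 i hin]
    congr 1
    apply lsc_filter_card_congr
    intro j hjn
    by_cases hjnode : j = node
    · subst hjnode
      constructor
      · rintro ⟨hje, -⟩
        exfalso
        rw [hneg] at hje
        omega
      · rintro ⟨hje, -⟩
        exfalso
        rw [hneg] at hje
        omega
    · constructor
      · rintro ⟨hje, hv⟩
        refine ⟨hje, ?_⟩
        rcases hv with hv | hv
        · exact Or.inl hv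
        · rcases List.mem_cons.mp hv with hv | hv
          · exact absurd hv hjnode
          · exact Or.inr hv
      · rintro ⟨hje, hv⟩
        refine ⟨hje, ?_⟩
        rcases hv with hv | hv
        · exact Or.inl hv
        · exact Or.inr (List.mem_cons_of_mem _ hv)
  | case3 ind vis node q' hneg nxv indv hcond ih =>
    intro h
    obtain ⟨h1, h2, h3, h4, h5, h6, h7⟩ := h
    obtain ⟨hnoden, hnodev⟩ := h3 node (List.mem_cons_self)
    obtain ⟨hgneg, -⟩ | ⟨e, he, hge, -⟩ := lsc_step_char edge hpre node hnoden
    · exact absurd hgneg hneg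
    have htn : (lscGetI edge node).toNat = e := by rw [hge]; omega
    have hnx : nxv = e := by rw [show nxv = (lscGetI edge node).toNat from rfl, htn]
    have hindv : indv = ind.set e (lscGetN ind e - 1) := by
      rw [show indv = ind.set nxv (lscGetN ind nxv - 1) from rfl, hnx]
    rw [hnx, hindv] at hcond
    rw [hnx, hindv] at ih
    have hnodeq' : node ∉ q' := (List.nodup_cons.mp h4).1
    have hJ2' : ∀ i, i < edge.length →
        lscGetN (ind.set e (lscGetN ind e - 1)) i =
        (((Finset.range edge.length).filter
          (fun j => lscGetI edge j = (i : Int) ∧ (lscGetB vis j = false ∨ j ∈ q'))).card : Int) := by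
      intro i hin
      rw [lscGetN_set]
      by_cases hie : e = i
      · subst hie
        rw [if_pos ⟨rfl, by omega⟩]
        have hins : (Finset.range edge.length).filter
            (fun j => lscGetI edge j = (e : Int) ∧ (lscGetB vis j = false ∨ j ∈ node :: q'))
            = insert node ((Finset.range edge.length).filter
              (fun j => lscGetI edge j = (e : Int) ∧ (lscGetB vis j = false ∨ j ∈ q'))) := by
          ext j
          simp only [Finset.mem_insert, Finset.mem_filter, Finset.mem_range]
          constructor
          · rintro ⟨hjn, hje, hv⟩
            by_cases hjnode : j = node
            · exact Or.inl hjnode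
            · refine Or.inr ⟨hjn, hje, ?_⟩
              rcases hv with hv | hv
              · exact Or.inl hv
              · rcases List.mem_cons.mp hv with hv | hv
                · exact absurd hv hjnode
                · exact Or.inr hv
          · rintro (hj | ⟨hjn, hje, hv⟩)
            · subst hj
              exact ⟨hnoden, hge, Or.inr (List.mem_cons_self)⟩
            · refine ⟨hjn, hje, ?_⟩
              rcases hv with hv | hv
              · exact Or.inl hv
              · exact Or.inr (List.mem_cons_of_mem _ hv)
        have hnotmem : node ∉ (Finset.range edge.length).filter
            (fun j => lscGetI edge j = (e : Int) ∧ (lscGetB vis j = false ∨ j ∈ q')) := by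
          rw [Finset.mem_filter]
          rintro ⟨-, -, hv | hv⟩
          · rw [hnodev] at hv; cases hv
          · exact hnodeq' hv
        rw [h5 e he, hins, Finset.card_insert_of_notMem hnotmem]
        push_cast
        ring
      · rw [if_neg (by tauto)]
        rw [h5 i hin]
        congr 1
        apply lsc_filter_card_congr
        intro j hjn
        by_cases hjnode : j = node
        · subst hjnode
          constructor
          · rintro ⟨hje, -⟩
            exfalso
            rw [hge] at hje
            have : e = i := by exact_mod_cast hje
            exact hie this
          · rintro ⟨hje, -⟩
            exfalso
            rw [hge] at hje
            have : e = i := by exact_mod_cast hje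
            exact hie this
        · constructor
          · rintro ⟨hje, hv⟩
            refine ⟨hje, ?_⟩
            rcases hv with hv | hv
            · exact Or.inl hv
            · rcases List.mem_cons.mp hv with hv | hv
              · exact absurd hv hjnode
              · exact Or.inr hv
          · rintro ⟨hje, hv⟩
            refine ⟨hje, ?_⟩
            rcases hv with hv | hv
            · exact Or.inl hv
            · exact Or.inr (List.mem_cons_of_mem _ hv)
    rw [lscBFS, if_neg hneg]
    simp only [htn]
    rw [dif_pos hcond]
    apply ih
    have heq' : e ∉ q' := by
      intro hmem
      have := (h3 e (List.mem_cons_of_mem _ hmem)).2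
      rw [this] at hcond
      exact absurd hcond.2.1 (by simp)
    refine ⟨by simp [h1], by simp [h2], ?_, ?_, ?_, ?_, ?_⟩
    · intro x hx
      rcases List.mem_append.mp hx with hx | hx
      · obtain ⟨hxn, hxv⟩ := h3 x (List.mem_cons_of_mem _ hx)
        refine ⟨hxn, ?_⟩
        rw [lscGetB_set]
        split
        · rfl
        · exact hxv
      · have hx : x = e := by simpa using hx
        subst hx
        refine ⟨he, ?_⟩
        rw [lscGetB_set, if_pos ⟨rfl, hcond.2.2⟩]
    · refine List.Nodup.append (List.nodup_cons.mp h4).2 (by simp) ?_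
      intro x hx hx'
      have : x = e := by simpa using hx'
      subst this
      exact heq' hx
    · intro i hin
      rw [hJ2' i hin]
      congr 1
      apply lsc_filter_card_congr
      intro j hjn
      by_cases hje : j = e
      · subst hje
        constructor
        · rintro ⟨hj1, -⟩
          exact ⟨hj1, Or.inr (List.mem_append.mpr (Or.inr (by simp)))⟩
        · rintro ⟨hj1, -⟩
          exact ⟨hj1, Or.inl hcond.2.1⟩
      · have hbv : lscGetB (vis.set e true) j = lscGetB vis j := by
          rw [lscGetB_set, if_neg (by tauto)]
        constructor
        · rintro ⟨hj1, hv⟩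
          refine ⟨hj1, ?_⟩
          rcases hv with hv | hv
          · exact Or.inl (by rw [hbv]; exact hv)
          · exact Or.inr (List.mem_append.mpr (Or.inl hv))
        · rintro ⟨hj1, hv⟩
          refine ⟨hj1, ?_⟩
          rcases hv with hv | hv
          · rw [hbv] at hv
            exact Or.inl hv
          · rcases List.mem_append.mp hv with hv | hv
            · exact Or.inr hv
            · exact absurd (by simpa using hv) hje
    · intro i hin hvis
      have hie : ¬ e = i := by
        intro hcon
        subst hcon
        rw [lscGetB_set, if_pos ⟨rfl, hcond.2.2⟩] at hvis
        cases hvis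
      have : lscGetB vis i = false := by
        rw [lscGetB_set, if_neg (by tauto)] at hvis
        exact hvis
      have := h6 i hin this
      rw [lscGetN_set, if_neg (by tauto)]
      exact this
    · intro S hSb hScl a haS
      have heS : e ∉ S := by
        intro heS
        obtain ⟨b, hbS, hbe⟩ := hScl e heS
        have hbn := hSb b hbS
        have hbv := h7 S hSb hScl b hbS
        have hbmem : b ∈ (Finset.range edge.length).filter
            (fun j => lscGetI edge j = (e : Int) ∧ (lscGetB vis j = false ∨ j ∈ q')) := by
          rw [Finset.mem_filter, Finset.mem_range]
          exact ⟨hbn, hbe, Or.inl hbv⟩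
        have hpos : 0 < ((Finset.range edge.length).filter
            (fun j => lscGetI edge j = (e : Int) ∧ (lscGetB vis j = false ∨ j ∈ q'))).card :=
          Finset.card_pos.mpr ⟨b, hbmem⟩
        have := hJ2' e he
        rw [hcond.1] at this
        omega
      have hane : ¬ e = a := fun hcon => heS (hcon ▸ haS)
      rw [lscGetB_set, if_neg (by tauto)]
      exact h7 S hSb hScl a haS
  | case4 ind vis node q' hneg nxv indv hcond ih =>
    intro h
    obtain ⟨h1, h2, h3, h4, h5, h6, h7⟩ := h
    obtain ⟨hnoden, hnodev⟩ := h3 node (List.mem_cons_self)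
    obtain ⟨hgneg, -⟩ | ⟨e, he, hge, -⟩ := lsc_step_char edge hpre node hnoden
    · exact absurd hgneg hneg
    have htn : (lscGetI edge node).toNat = e := by rw [hge]; omega
    have hnx : nxv = e := by rw [show nxv = (lscGetI edge node).toNat from rfl, htn]
    have hindv : indv = ind.set e (lscGetN ind e - 1) := by
      rw [show indv = ind.set nxv (lscGetN ind nxv - 1) from rfl, hnx]
    rw [hnx, hindv] at hcond
    rw [hindv] at ih
    have hnodeq' : node ∉ q' := (List.nodup_cons.mp h4).1
    have hJ2' : ∀ i, i < edge.length →
        lscGetN (ind.set e (lscGetN ind e - 1)) i =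
        (((Finset.range edge.length).filter
          (fun j => lscGetI edge j = (i : Int) ∧ (lscGetB vis j = false ∨ j ∈ q'))).card : Int) := by
      intro i hin
      rw [lscGetN_set]
      by_cases hie : e = i
      · subst hie
        rw [if_pos ⟨rfl, by omega⟩]
        have hins : (Finset.range edge.length).filter
            (fun j => lscGetI edge j = (e : Int) ∧ (lscGetB vis j = false ∨ j ∈ node :: q'))
            = insert node ((Finset.range edge.length).filter
              (fun j => lscGetI edge j = (e : Int) ∧ (lscGetB vis j = false ∨ j ∈ q'))) := by
          ext j
          simp only [Finset.mem_insert, Finset.mem_filter, Finset.mem_range]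
          constructor
          · rintro ⟨hjn, hje, hv⟩
            by_cases hjnode : j = node
            · exact Or.inl hjnode
            · refine Or.inr ⟨hjn, hje, ?_⟩
              rcases hv with hv | hv
              · exact Or.inl hv
              · rcases List.mem_cons.mp hv with hv | hv
                · exact absurd hv hjnode
                · exact Or.inr hv
          · rintro (hj | ⟨hjn, hje, hv⟩)
            · subst hj
              exact ⟨hnoden, hge, Or.inr (List.mem_cons_self)⟩
            · refine ⟨hjn, hje, ?_⟩
              rcases hv with hv | hv
              · exact Or.inl hv
              · exact Or.inr (List.mem_cons_of_mem _ hv)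
        have hnotmem : node ∉ (Finset.range edge.length).filter
            (fun j => lscGetI edge j = (e : Int) ∧ (lscGetB vis j = false ∨ j ∈ q')) := by
          rw [Finset.mem_filter]
          rintro ⟨-, -, hv | hv⟩
          · rw [hnodev] at hv; cases hv
          · exact hnodeq' hv
        rw [h5 e he, hins, Finset.card_insert_of_notMem hnotmem]
        push_cast
        ring
      · rw [if_neg (by tauto)]
        rw [h5 i hin]
        congr 1
        apply lsc_filter_card_congr
        intro j hjn
        by_cases hjnode : j = node
        · subst hjnode
          constructor
          · rintro ⟨hje, -⟩
            exfalso
            rw [hge] at hje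
            have : e = i := by exact_mod_cast hje
            exact hie this
          · rintro ⟨hje, -⟩
            exfalso
            rw [hge] at hje
            have : e = i := by exact_mod_cast hje
            exact hie this
        · constructor
          · rintro ⟨hje, hv⟩
            refine ⟨hje, ?_⟩
            rcases hv with hv | hv
            · exact Or.inl hv
            · rcases List.mem_cons.mp hv with hv | hv
              · exact absurd hv hjnode
              · exact Or.inr hv
          · rintro ⟨hje, hv⟩
            refine ⟨hje, ?_⟩
            rcases hv with hv | hv
            · exact Or.inl hv
            · exact Or.inr (List.mem_cons_of_mem _ hv)
    rw [lscBFS, if_neg hneg]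
    simp only [htn]
    rw [dif_neg hcond]
    apply ih
    refine ⟨by simp [h1], h2, fun x hx => h3 x (List.mem_cons_of_mem _ hx),
      (List.nodup_cons.mp h4).2, hJ2', ?_, h7⟩
    intro i hin hvis
    by_cases hie : e = i
    · subst hie
      intro hcon
      exact hcond ⟨hcon, hvis, by omega⟩
    · rw [lscGetN_set, if_neg (by tauto)]
      exact h6 i hin hvis

theorem lsc_inv_start (edge : List Int) (hpre : Pre_largest_sum_cycle edge) :
    lscInv edge (lscIndeg edge) (lscInit (lscIndeg edge)).1 (lscInit (lscIndeg edge)).2 := by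
  obtain ⟨v1, v2, v3⟩ := lsc_init_spec (lscIndeg edge)
  have hlen := lsc_indeg_len edge
  have hq : ∀ x, x ∈ (lscInit (lscIndeg edge)).2 ↔
      (x < edge.length ∧ lscGetN (lscIndeg edge) x = 0) := by
    intro x
    rw [v3, List.mem_filter, List.mem_range, hlen]
    simp
  have hv : ∀ i, i < edge.length →
      (lscGetB (lscInit (lscIndeg edge)).1 i = true ↔ lscGetN (lscIndeg edge) i = 0) := by
    intro i hin
    rw [v2 i (by omega)]
    simp
  refine ⟨hlen, by rw [v1, hlen], ?_, ?_, ?_, ?_, ?_⟩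
  · intro x hx
    obtain ⟨hx1, hx2⟩ := (hq x).mp hx
    exact ⟨hx1, (hv x hx1).mpr hx2⟩
  · rw [v3]
    exact (List.nodup_range).filter _
  · intro i hin
    rw [lsc_indeg_spec edge hpre i hin]
    congr 1
    apply lsc_filter_card_congr
    intro j hjn
    constructor
    · intro hje
      refine ⟨hje, ?_⟩
      cases hgb : lscGetB (lscInit (lscIndeg edge)).1 j with
      | false => exact Or.inl rfl
      | true =>
        have := (hv j hjn).mp hgb
        exact Or.inr ((hq j).mpr ⟨hjn, this⟩)
    · rintro ⟨hje, -⟩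
      exact hje
  · intro i hin hvis
    intro hcon
    have := (hv i hin).mpr hcon
    rw [this] at hvis
    cases hvis
  · intro S hSb hScl a haS
    obtain ⟨b, hbS, hbe⟩ := hScl a haS
    have hbn := hSb b hbS
    have han := hSb a haS
    have hbmem : b ∈ (Finset.range edge.length).filter
        (fun j => lscGetI edge j = (a : Int)) := by
      rw [Finset.mem_filter, Finset.mem_range]
      exact ⟨hbn, hbe⟩
    have hpos : 0 < ((Finset.range edge.length).filter
        (fun j => lscGetI edge j = (a : Int))).card := Finset.card_pos.mpr ⟨b, hbmem⟩
    have hne : lscGetN (lscIndeg edge) a ≠ 0 := by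
      rw [lsc_indeg_spec edge hpre a han]
      intro hcon
      omega
    cases hgb : lscGetB (lscInit (lscIndeg edge)).1 a with
    | false => rfl
    | true => exact absurd ((hv a han).mp hgb) hne

-- every member of a "back-closed" set is a cycle node (pigeonhole on a predecessor chain)
theorem lsc_backclosed_cyc (edge : List Int) (hpre : Pre_largest_sum_cycle edge)
    (S : Finset Nat) (hb : ∀ a ∈ S, a < edge.length)
    (hcl : ∀ a ∈ S, ∃ b ∈ S, lscGetI edge b = (a : Int)) :
    ∀ a ∈ S, lscCyc edge a := by
  intro a haS
  have hstep : ∀ (x : {y // y ∈ S}), ∃ b : {y // y ∈ S}, lscGetI edge b.1 = (x.1 : Int) := by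
    intro x
    obtain ⟨b, hbS, hbe⟩ := hcl x.1 x.2
    exact ⟨⟨b, hbS⟩, hbe⟩
  let f : {y // y ∈ S} → {y // y ∈ S} := fun x => (hstep x).choose
  have hf : ∀ x, lscGetI edge (f x).1 = (x.1 : Int) := fun x => (hstep x).choose_spec
  let seq : Nat → {y // y ∈ S} := fun k => f^[k] ⟨a, haS⟩
  have hseq : ∀ k, lscIter edge k (seq k).1 = some a := by
    intro k
    induction k with
    | zero => rfl
    | succ k ih =>
      have hsucc : seq (k+1) = f (seq k) := Function.iterate_succ_apply' f k _
      have hstepk : lscStep edge (seq (k+1)).1 = some (seq k).1 := by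
        rw [hsucc]
        have := hf (seq k)
        rw [lscStep, this]
        rw [if_neg (by omega)]
        simp
      calc lscIter edge (k+1) (seq (k+1)).1
          = (lscStep edge (seq (k+1)).1).bind (lscIter edge k) := rfl
        _ = lscIter edge k (seq k).1 := by rw [hstepk, Option.bind_some]
        _ = some a := ih
  have hmt : Set.MapsTo (fun k => (seq k).1)
      ↑(Finset.range (edge.length + 1)) ↑(Finset.range edge.length) := by
    intro k _
    simp only [Finset.coe_range, Set.mem_Iio]
    exact hb (seq k).1 (seq k).2
  obtain ⟨x, hx, y, hy, hxy, hfeq⟩ :=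
    Finset.exists_ne_map_eq_of_card_lt_of_maps_to (by simp) hmt
  rw [Finset.mem_range] at hx
  rw [Finset.mem_range] at hy
  have key : ∀ u v, u < v → v ≤ edge.length → (seq u).1 = (seq v).1 → lscCyc edge a := by
    intro u v huv hvn hseq_eq
    have h1 : lscIter edge u (seq v).1 = some a := by rw [← hseq_eq]; exact hseq u
    have h2 : lscIter edge v (seq v).1 = some a := hseq v
    have h3 : lscIter edge (u + (v - u)) (seq v).1
        = (lscIter edge u (seq v).1).bind (lscIter edge (v - u)) :=
      lsc_iter_add edge u (v - u) _
    rw [show u + (v - u) = v by omega, h2, h1, Option.bind_some] at h3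
    exact lsc_period_compress edge hpre a (hb a haS) (v - u) (by omega) h3.symm
  rcases Nat.lt_or_ge x y with h | h
  · exact key x y h (by omega) hfeq
  · exact key y x (by omega) (by omega) hfeq.symm

theorem lsc_vis2_char (edge : List Int) (hpre : Pre_largest_sum_cycle edge) :
    (lscBFS edge (lscIndeg edge) (lscInit (lscIndeg edge)).1 (lscInit (lscIndeg edge)).2).length
        = edge.length ∧
    ∀ i, i < edge.length →
      (lscGetB (lscBFS edge (lscIndeg edge) (lscInit (lscIndeg edge)).1
          (lscInit (lscIndeg edge)).2) i = false ↔ lscCyc edge i) := by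
  obtain ⟨e1, e2, e3⟩ := lsc_bfs_inv edge hpre _ _ _ (lsc_inv_start edge hpre)
  refine ⟨e1, ?_⟩
  intro i hin
  constructor
  · intro hvis
    apply lsc_backclosed_cyc edge hpre
      ((Finset.range edge.length).filter (fun j => lscGetB (lscBFS edge (lscIndeg edge)
        (lscInit (lscIndeg edge)).1 (lscInit (lscIndeg edge)).2) j = false))
    · intro x hx
      rw [Finset.mem_filter, Finset.mem_range] at hx
      exact hx.1
    · intro x hx
      rw [Finset.mem_filter, Finset.mem_range] at hx
      obtain ⟨j, hjn, hje, hjv⟩ := e2 x hx.1 hx.2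
      exact ⟨j, by rw [Finset.mem_filter, Finset.mem_range]; exact ⟨hjn, hjv⟩, hje⟩
    · rw [Finset.mem_filter, Finset.mem_range]
      exact ⟨hin, hvis⟩
  · intro hcyc
    have hS : ∀ a ∈ (Finset.range edge.length).filter (fun j => lscReach edge i j),
        lscGetB (lscBFS edge (lscIndeg edge) (lscInit (lscIndeg edge)).1
          (lscInit (lscIndeg edge)).2) a = false := by
      apply e3
      · intro x hx
        rw [Finset.mem_filter, Finset.mem_range] at hx
        exact hx.1
      · intro x hx
        rw [Finset.mem_filter, Finset.mem_range] at hx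
        obtain ⟨hxn, s, hsn, hsx⟩ := hx
        rcases Nat.eq_zero_or_pos s with hs0 | hs1
        · subst hs0
          have hxi : x = i := by
            simp only [lscIter] at hsx
            cases hsx
            rfl
          subst hxi
          obtain ⟨k, hk, hki⟩ := hcyc
          obtain ⟨b, hbk⟩ := lsc_iter_prefix edge (k+1) x x hki k (by omega)
          have hbn : b < edge.length := lsc_iter_lt edge hpre k x b hxn hbk
          have hstepb : lscStep edge b = some x := by
            have h3 : lscIter edge (k + 1) x = (lscIter edge k x).bind (lscIter edge 1) :=
              lsc_iter_add edge k 1 x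
            rw [hki, hbk, Option.bind_some] at h3
            simp only [lscIter] at h3
            cases hsb : lscStep edge b with
            | none => rw [hsb] at h3; cases h3
            | some m =>
              rw [hsb] at h3
              simp only [Option.bind_some, lscIter] at h3
              cases h3
              rfl
          refine ⟨b, ?_, lsc_getI_step edge hpre b x hbn hstepb⟩
          rw [Finset.mem_filter, Finset.mem_range]
          exact ⟨hbn, k, by omega, hbk⟩
        · obtain ⟨b, hbk⟩ := lsc_iter_prefix edge s i x hsx (s-1) (by omega)
          have hbn : b < edge.length := lsc_iter_lt edge hpre (s-1) i b hin hbk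
          have hstepb : lscStep edge b = some x := by
            have h3 : lscIter edge ((s-1) + 1) i = (lscIter edge (s-1) i).bind (lscIter edge 1) :=
              lsc_iter_add edge (s-1) 1 i
            rw [show s - 1 + 1 = s by omega, hsx, hbk, Option.bind_some] at h3
            simp only [lscIter] at h3
            cases hsb : lscStep edge b with
            | none => rw [hsb] at h3; cases h3
            | some m =>
              rw [hsb] at h3
              simp only [Option.bind_some, lscIter] at h3
              cases h3
              rfl
          refine ⟨b, ?_, lsc_getI_step edge hpre b x hbn hstepb⟩
          rw [Finset.mem_filter, Finset.mem_range]
          exact ⟨hbn, s - 1, by omega, hbk⟩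
    apply hS
    rw [Finset.mem_filter, Finset.mem_range]
    exact ⟨hin, 0, by omega, rfl⟩

-- ---------- A side: phase 3 ----------
theorem lsc_step_of_iter (edge : List Int) (t i c c2 : Nat)
    (h1 : lscIter edge t i = some c) (h2 : lscIter edge (t+1) i = some c2) :
    lscStep edge c = some c2 := by
  have h3 : lscIter edge (t + 1) i = (lscIter edge t i).bind (lscIter edge 1) :=
    lsc_iter_add edge t 1 i
  rw [h2, h1, Option.bind_some] at h3
  simp only [lscIter] at h3
  cases hs : lscStep edge c with
  | none => rw [hs] at h3; cases h3
  | some m =>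
    rw [hs] at h3
    simp only [Option.bind_some, lscIter] at h3
    cases h3
    rfl

theorem lsc_Ico_split (f : Nat → Int) (t L : Nat) (h : t < L) :
    ∑ s ∈ Finset.Ico t L, f s = f t + ∑ s ∈ Finset.Ico (t+1) L, f s := by
  have h1 : Finset.Ico t L = insert t (Finset.Ico (t+1) L) := by
    ext x; simp only [Finset.mem_Ico, Finset.mem_insert]; omega
  rw [h1, Finset.sum_insert (by simp [Finset.mem_Ico])]

theorem lsc_le_fold (b : Int) (f : Nat → Int) (s : Finset Nat) :
    b ≤ Finset.fold max b f s := by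
  induction s using Finset.induction_on with
  | empty => simp
  | insert a t ha ih =>
    rw [Finset.fold_insert ha]
    exact le_trans ih (le_max_right _ _)

theorem lsc_fold_max_union (b : Int) (f : Nat → Int) (s t : Finset Nat)
    (hd : ∀ x ∈ t, x ∉ s) :
    Finset.fold max b f (s ∪ t) = max (Finset.fold max b f s) (Finset.fold max b f t) := by
  induction t using Finset.induction_on with
  | empty =>
    rw [Finset.union_empty, Finset.fold_empty]
    exact (max_eq_left (lsc_le_fold b f s)).symm
  | insert a t ha ih =>
    have has : a ∉ s := hd a (Finset.mem_insert_self a t)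
    have hat : a ∉ s ∪ t := by
      rw [Finset.mem_union]
      rintro (h | h)
      · exact has h
      · exact ha h
    rw [Finset.union_insert, Finset.fold_insert hat, Finset.fold_insert ha]
    rw [ih (fun x hx => hd x (Finset.mem_insert_of_mem hx))]
    rw [max_left_comm]

theorem lsc_fold_max_const (c b : Int) (s : Finset Nat) (hne : s.Nonempty) :
    Finset.fold max b (fun _ => c) s = max c b := by
  induction s using Finset.induction_on with
  | empty => exact absurd hne (by simp)
  | insert a t ha ih =>
    rw [Finset.fold_insert ha]
    rcases t.eq_empty_or_nonempty with ht | ht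
    · subst ht; simp
    · rw [ih ht, ← max_assoc, max_self]

theorem lsc_walkA_spec (edge : List Int) (hpre : Pre_largest_sum_cycle edge)
    (i L : Nat) (hi : i < edge.length) (hL1 : 1 ≤ L) (hLn : L ≤ edge.length)
    (hiter : lscIter edge L i = some i)
    (hmin : ∀ m, 1 ≤ m → m < L → lscIter edge m i ≠ some i)
    (vis : List Bool) (hlen : vis.length = edge.length)
    (hdisj : ∀ j ∈ lscCycleSet edge i, lscGetB vis j = false) :
    ∀ t, t ≤ L → ∀ visT : List Bool, visT.length = edge.length →
      (∀ j, j < edge.length → lscGetB visT j =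
        (lscGetB vis j || decide (∃ s, s < t ∧ lscIter edge s i = some j))) →
      ∀ s0 : Int,
      (lscWalk edge visT (Int.ofNat ((lscIter edge t i).getD 0)) s0).2 =
          s0 + ∑ s ∈ Finset.Ico t L, (((lscIter edge s i).getD 0 : Nat) : Int) ∧
      (lscWalk edge visT (Int.ofNat ((lscIter edge t i).getD 0)) s0).1.length = edge.length ∧
      (∀ j, j < edge.length →
        lscGetB (lscWalk edge visT (Int.ofNat ((lscIter edge t i).getD 0)) s0).1 j =
          (lscGetB vis j || decide (j ∈ lscCycleSet edge i))) := by
  have horb : ∀ s, s ≤ L → ∃ c, lscIter edge s i = some c := lsc_orbit_defined edge i L hiter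
  have hCS := lsc_cycleSet_orbit edge hpre i L hi hL1 hLn hiter hmin
  have hmem_iff : ∀ j, (j ∈ lscCycleSet edge i ↔ ∃ s, s < L ∧ lscIter edge s i = some j) := by
    intro j
    rw [hCS, Finset.mem_image]
    constructor
    · rintro ⟨s, hs, hsj⟩
      rw [Finset.mem_range] at hs
      obtain ⟨c, hc⟩ := horb s (by omega)
      rw [hc] at hsj
      simp only [Option.getD_some] at hsj
      exact ⟨s, hs, by rw [hc, hsj]⟩
    · rintro ⟨s, hs, hsj⟩
      exact ⟨s, Finset.mem_range.mpr hs, by rw [hsj]; rfl⟩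
  have main : ∀ d t, t ≤ L → L - t = d → ∀ visT : List Bool, visT.length = edge.length →
      (∀ j, j < edge.length → lscGetB visT j =
        (lscGetB vis j || decide (∃ s, s < t ∧ lscIter edge s i = some j))) →
      ∀ s0 : Int,
      (lscWalk edge visT (Int.ofNat ((lscIter edge t i).getD 0)) s0).2 =
          s0 + ∑ s ∈ Finset.Ico t L, (((lscIter edge s i).getD 0 : Nat) : Int) ∧
      (lscWalk edge visT (Int.ofNat ((lscIter edge t i).getD 0)) s0).1.length = edge.length ∧
      (∀ j, j < edge.length →
        lscGetB (lscWalk edge visT (Int.ofNat ((lscIter edge t i).getD 0)) s0).1 j =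
          (lscGetB vis j || decide (j ∈ lscCycleSet edge i))) := by
    intro d
    induction d with
    | zero =>
      intro t htL hd visT hlenT hcharT s0
      have ht : t = L := by omega
      subst ht
      rw [hiter]
      simp only [Option.getD_some]
      have hvisi : lscGetB visT ((Int.ofNat i).toNat) = true := by
        have : (Int.ofNat i).toNat = i := by simp
        rw [this, hcharT i hi]
        have : (∃ s, s < t ∧ lscIter edge s i = some i) := ⟨0, by omega, rfl⟩
        simp [this]
      rw [lscWalk, dif_neg (by rw [hvisi]; simp)]
      refine ⟨by simp, hlenT, ?_⟩
      intro j hj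
      rw [hcharT j hj]
      congr 1
      rw [decide_eq_decide]
      exact (hmem_iff j).symm
    | succ d ih =>
      intro t htL hd visT hlenT hcharT s0
      have htL' : t < L := by omega
      obtain ⟨c, hc⟩ := horb t (by omega)
      obtain ⟨c2, hc2⟩ := horb (t+1) (by omega)
      have hcn : c < edge.length := lsc_iter_lt edge hpre t i c hi hc
      have hcCS : c ∈ lscCycleSet edge i := (hmem_iff c).mpr ⟨t, htL', hc⟩
      have hvc : lscGetB visT c = false := by
        rw [hcharT c hcn, hdisj c hcCS]
        simp only [Bool.false_or]
        rw [decide_eq_false_iff_not]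
        rintro ⟨s, hst, hsc⟩
        have : s = t := lsc_orbit_inj edge i L hL1 hiter hmin s t (by omega) htL'
          (by rw [hsc, hc])
        omega
      rw [hc]
      simp only [Option.getD_some]
      have htn : (Int.ofNat c).toNat = c := by simp
      rw [lscWalk, dif_pos (by rw [htn]; exact ⟨hvc, by omega⟩)]
      rw [htn]
      have hstepc : lscStep edge c = some c2 := lsc_step_of_iter edge t i c c2 hc hc2
      have hgc : lscGetI edge c = (c2 : Int) := lsc_getI_step edge hpre c c2 hcn hstepc
      have ihres := ih (t+1) (by omega) (by omega) (visT.set c true)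
        (by rw [List.length_set]; exact hlenT) ?_ (s0 + Int.ofNat c)
      · rw [hc2] at ihres
        simp only [Option.getD_some] at ihres
        obtain ⟨r1, r2, r3⟩ := ihres
        have harg : lscGetI edge c = Int.ofNat c2 := by rw [hgc]; simp
        rw [harg]
        refine ⟨?_, r2, r3⟩
        rw [r1, lsc_Ico_split _ t L htL', hc]
        simp only [Option.getD_some]
        have : (Int.ofNat c : Int) = (c : Int) := by simp
        rw [this]
        ring
      · intro j hj
        rw [lscGetB_set]
        by_cases hcj : c = j
        · subst hcj
          rw [if_pos ⟨rfl, by omega⟩]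
          have hdec : decide (∃ s, s < t + 1 ∧ lscIter edge s i = some c) = true := by
            simp only [decide_eq_true_eq]
            exact ⟨t, by omega, hc⟩
          rw [hdec, Bool.or_true]
        · rw [if_neg (by tauto), hcharT j hj]
          congr 1
          rw [decide_eq_decide]
          constructor
          · rintro ⟨s, hst, hsj⟩
            exact ⟨s, by omega, hsj⟩
          · rintro ⟨s, hst, hsj⟩
            refine ⟨s, ?_, hsj⟩
            rcases Nat.lt_or_ge s t with h | h
            · omega
            · exfalso
              have : s = t := by omega
              subst this
              rw [hc] at hsj
              cases hsj
              exact hcj rfl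
  intro t htL visT hlenT hcharT s0
  exact main (L - t) t htL rfl visT hlenT hcharT s0

def lscP3Inv (edge : List Int) (m : Nat) (st : List Bool × Int) : Prop :=
  st.1.length = edge.length ∧
  (∀ j, j < edge.length → (lscGetB st.1 j = true ↔
      (¬ lscCyc edge j ∨ ∃ x ∈ lscCycleSet edge j, x < m))) ∧
  st.2 = Finset.fold max (-1) (lscCsum edge)
      ((Finset.range edge.length).filter
        (fun j => lscCyc edge j ∧ ∃ x ∈ lscCycleSet edge j, x < m))

theorem lsc_phase3 (edge : List Int) (hpre : Pre_largest_sum_cycle edge)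
    (vis2 : List Bool) (h0 : lscP3Inv edge 0 (vis2, -1)) (m : Nat) (hm : m ≤ edge.length) :
    lscP3Inv edge m ((List.range m).foldl
      (fun st i =>
        if lscGetB st.1 i then st
        else
          let w := lscWalk edge st.1 (Int.ofNat i) 0
          (w.1, max st.2 w.2))
      (vis2, (-1 : Int))) := by
  induction m with
  | zero => simpa using h0
  | succ m ihm =>
    have ih := ihm (by omega)
    have hm' : m < edge.length := by omega
    rw [List.range_succ, List.foldl_append]
    simp only [List.foldl_cons, List.foldl_nil]
    set prev := (List.range m).foldl
      (fun st i =>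
        if lscGetB st.1 i then st
        else
          let w := lscWalk edge st.1 (Int.ofNat i) 0
          (w.1, max st.2 w.2))
      (vis2, (-1 : Int)) with hprev
    obtain ⟨p1, p2, p3⟩ := ih
    have hsymCS : ∀ a b : Nat, a < edge.length → b ∈ lscCycleSet edge a →
        a ∈ lscCycleSet edge b := by
      intro a b han hb
      simp only [lscCycleSet, Finset.mem_filter, Finset.mem_range] at hb ⊢
      exact ⟨han, hb.2.2, hb.2.1⟩
    by_cases hv : lscGetB prev.1 m = true
    · rw [if_pos hv]
      have key : ∀ j, j < edge.length → lscCyc edge j →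
          ((∃ x ∈ lscCycleSet edge j, x < m + 1) ↔ (∃ x ∈ lscCycleSet edge j, x < m)) := by
        intro j hj hcj
        constructor
        · rintro ⟨x, hx, hlt⟩
          rcases Nat.lt_or_ge x m with h | h
          · exact ⟨x, hx, h⟩
          · have hxm : x = m := by omega
            subst hxm
            obtain ⟨hcm, hCSm⟩ := lsc_cycleSet_congr edge hpre j x hj hx hcj
            rcases (p2 x hm').mp hv with hnc | ⟨y, hy, hylt⟩
            · exact absurd hcm hnc
            · rw [hCSm] at hy
              exact ⟨y, hy, hylt⟩
        · rintro ⟨x, hx, hlt⟩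
          exact ⟨x, hx, by omega⟩
      refine ⟨p1, ?_, ?_⟩
      · intro j hj
        constructor
        · intro hb
          rcases (p2 j hj).mp hb with hnc | ⟨x, hx, hlt⟩
          · exact Or.inl hnc
          · exact Or.inr ⟨x, hx, by omega⟩
        · intro hr
          apply (p2 j hj).mpr
          rcases hr with hnc | hx
          · exact Or.inl hnc
          · by_cases hcj : lscCyc edge j
            · exact Or.inr ((key j hj hcj).mp hx)
            · exact Or.inl hcj
      · rw [p3]
        congr 1
        apply Finset.filter_congr
        intro j hj
        rw [Finset.mem_range] at hj
        constructor
        · rintro ⟨hcj, hx⟩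
          exact ⟨hcj, ((key j hj hcj).mpr hx)⟩
        · rintro ⟨hcj, hx⟩
          exact ⟨hcj, ((key j hj hcj).mp hx)⟩
    · rw [if_neg hv]
      have hvfalse : lscGetB prev.1 m = false := by
        cases h : lscGetB prev.1 m
        · rfl
        · exact absurd h hv
      have hnor : ¬ (¬ lscCyc edge m ∨ ∃ x ∈ lscCycleSet edge m, x < m) := by
        intro hcon
        exact hv ((p2 m hm').mpr hcon)
      push_neg at hnor
      obtain ⟨hcm, hnt⟩ := hnor
      obtain ⟨L, hL1, hLn, hiter, hminp⟩ := lsc_min_period edge m hcm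
      have hsub : ∀ j ∈ lscCycleSet edge m, j < edge.length := by
        intro j hj
        simp only [lscCycleSet, Finset.mem_filter, Finset.mem_range] at hj
        exact hj.1
      have hdisj : ∀ j ∈ lscCycleSet edge m, lscGetB prev.1 j = false := by
        intro j hj
        obtain ⟨hcj, hCSj⟩ := lsc_cycleSet_congr edge hpre m j hm' hj hcm
        cases hgb : lscGetB prev.1 j
        · rfl
        · exfalso
          rcases (p2 j (hsub j hj)).mp hgb with hnc | ⟨x, hx, hlt⟩
          · exact hnc hcj
          · rw [hCSj] at hx
            have := hnt x hx
            omega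
      have hwalk := lsc_walkA_spec edge hpre m L hm' hL1 hLn hiter hminp prev.1 p1 hdisj
        0 (by omega) prev.1 p1 (by intro j hj; simp) 0
      have harg : (Int.ofNat ((lscIter edge 0 m).getD 0)) = Int.ofNat m := rfl
      rw [harg] at hwalk
      obtain ⟨r1, r2, r3⟩ := hwalk
      have hcsum : (lscWalk edge prev.1 (Int.ofNat m) 0).2 = lscCsum edge m := by
        rw [r1, lsc_csum_orbit edge hpre m L hm' hL1 hLn hiter hminp, Finset.range_eq_Ico]
        ring
      refine ⟨r2, ?_, ?_⟩
      · intro j hj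
        rw [r3 j hj]
        constructor
        · intro hb
          rcases Bool.or_eq_true_iff.mp hb with hb | hb
          · rcases (p2 j hj).mp hb with hnc | ⟨x, hx, hlt⟩
            · exact Or.inl hnc
            · exact Or.inr ⟨x, hx, by omega⟩
          · rw [decide_eq_true_eq] at hb
            obtain ⟨hcj, hCSj⟩ := lsc_cycleSet_congr edge hpre m j hm' hb hcm
            refine Or.inr ⟨m, ?_, by omega⟩
            rw [hCSj]
            exact lsc_mem_cycleSet_self edge m hm'
        · intro hr
          rcases hr with hnc | ⟨x, hx, hlt⟩
          · rw [(p2 j hj).mpr (Or.inl hnc)]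
            simp
          · rcases Nat.lt_or_ge x m with h | h
            · rw [(p2 j hj).mpr (Or.inr ⟨x, hx, h⟩)]
              simp
            · have hxm : x = m := by omega
              subst hxm
              have hjCS : j ∈ lscCycleSet edge x := hsymCS j x hj hx
              have : decide (j ∈ lscCycleSet edge x) = true := by
                rw [decide_eq_true_eq]
                exact hjCS
              rw [this, Bool.or_true]
      · have hfil : (Finset.range edge.length).filter
            (fun j => lscCyc edge j ∧ ∃ x ∈ lscCycleSet edge j, x < m + 1)
            = ((Finset.range edge.length).filter
                (fun j => lscCyc edge j ∧ ∃ x ∈ lscCycleSet edge j, x < m))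
              ∪ lscCycleSet edge m := by
          ext j
          simp only [Finset.mem_union, Finset.mem_filter, Finset.mem_range]
          constructor
          · rintro ⟨hjn, hcj, x, hx, hlt⟩
            rcases Nat.lt_or_ge x m with h | h
            · exact Or.inl ⟨hjn, hcj, x, hx, h⟩
            · have hxm : x = m := by omega
              subst hxm
              exact Or.inr (hsymCS j x hjn hx)
          · rintro (⟨hjn, hcj, x, hx, hlt⟩ | hjCS)
            · exact ⟨hjn, hcj, x, hx, by omega⟩
            · obtain ⟨hcj, hCSj⟩ := lsc_cycleSet_congr edge hpre m j hm' hjCS hcm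
              refine ⟨hsub j hjCS, hcj, m, ?_, by omega⟩
              rw [hCSj]
              exact lsc_mem_cycleSet_self edge m hm'
        have hdisj2 : ∀ x ∈ lscCycleSet edge m,
            x ∉ (Finset.range edge.length).filter
              (fun j => lscCyc edge j ∧ ∃ y ∈ lscCycleSet edge j, y < m) := by
          intro x hxCS hxf
          rw [Finset.mem_filter] at hxf
          obtain ⟨-, -, y, hy, hylt⟩ := hxf
          obtain ⟨hcx, hCSx⟩ := lsc_cycleSet_congr edge hpre m x hm' hxCS hcm
          rw [hCSx] at hy
          have := hnt y hy
          omega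
        rw [hfil, lsc_fold_max_union _ _ _ _ hdisj2]
        have hconst : Finset.fold max (-1) (lscCsum edge) (lscCycleSet edge m)
            = max (lscCsum edge m) (-1) := by
          rw [Finset.fold_congr (g := fun _ => lscCsum edge m) ?_]
          · exact lsc_fold_max_const _ _ _ ⟨m, lsc_mem_cycleSet_self edge m hm'⟩
          · intro x hx
            obtain ⟨-, hCSx⟩ := lsc_cycleSet_congr edge hpre m x hm' hx hcm
            rw [lscCsum, lscCsum, hCSx]
        rw [hconst, ← p3, hcsum]
        have hble : (-1 : Int) ≤ prev.2 := by
          rw [p3]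
          exact lsc_le_fold _ _ _
        rw [max_comm (lscCsum edge m) (-1), ← max_assoc]
        rw [max_eq_left hble]

theorem lsc_A_spec (edge : List Int) (hpre : Pre_largest_sum_cycle edge) :
    largest_sum_cycle edge = lscSpecVal edge := by
  obtain ⟨hlen2, hiff⟩ := lsc_vis2_char edge hpre
  have h0 : lscP3Inv edge 0
      (lscBFS edge (lscIndeg edge) (lscInit (lscIndeg edge)).1 (lscInit (lscIndeg edge)).2,
        -1) := by
    refine ⟨hlen2, ?_, ?_⟩
    · intro j hj
      constructor
      · intro hb
        refine Or.inl ?_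
        intro hcyc
        rw [(hiff j hj).mpr hcyc] at hb
        cases hb
      · rintro (hnc | ⟨x, hx, hlt⟩)
        · cases hgb : lscGetB (lscBFS edge (lscIndeg edge) (lscInit (lscIndeg edge)).1
              (lscInit (lscIndeg edge)).2) j
          · exact absurd ((hiff j hj).mp hgb) hnc
          · rfl
        · omega
    · have hemp : (Finset.range edge.length).filter
          (fun j => lscCyc edge j ∧ ∃ x ∈ lscCycleSet edge j, x < 0) = ∅ := by
        ext j
        simp only [Finset.mem_filter, Finset.notMem_empty, iff_false]
        rintro ⟨-, -, x, -, hx⟩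
        omega
      rw [hemp, Finset.fold_empty]
  obtain ⟨-, -, p3⟩ := lsc_phase3 edge hpre _ h0 edge.length (le_refl _)
  show ((List.range edge.length).foldl
      (fun st i =>
        if lscGetB st.1 i then st
        else
          let w := lscWalk edge st.1 (Int.ofNat i) 0
          (w.1, max st.2 w.2))
      (lscBFS edge (lscIndeg edge) (lscInit (lscIndeg edge)).1 (lscInit (lscIndeg edge)).2,
        (-1 : Int))).2 = lscSpecVal edge
  rw [p3, lscSpecVal]
  congr 1
  apply Finset.filter_congr
  intro j hj
  rw [Finset.mem_range] at hj
  constructor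
  · rintro ⟨hcj, -⟩
    exact hcj
  · intro hcj
    refine ⟨hcj, j, lsc_mem_cycleSet_self edge j hj, hj⟩

theorem lsc_main (edge : List Int) (hpre : Pre_largest_sum_cycle edge) :
    largest_sum_cycle edge = largest_sum_cycle_alt edge := by
  rw [lsc_A_spec edge hpre, lsc_altB_spec edge hpre]

-- ===== VERDICT (by name: the statement is the Claim_ definition above) =====
theorem largest_sum_cycle_spec : Claim_equal_largest_sum_cycle := by
  intro edge _ hpre
  exact lsc_main edge hpre
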